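-- pv_equiv track=rewrite | github.com/abhiiibabariya-dev/threat-intelligence-blueteam | scripts/email_analyzer.py | check_dkim
-- ===== SOURCE A (Python) =====
-- def check_dkim(headers: dict) -> dict:
--     """Analyze DKIM authentication results."""
--     result = {"status": "not_found", "details": "No DKIM signature found"}
--     for auth in headers.get('authentication-results', []):
--         auth_lower = auth.lower()
--         if 'dkim=pass' in auth_lower:
--             result = {"status": "pass", "details": auth.strip()}
--         elif 'dkim=fail' in auth_lower:
--             result = {"status": "fail", "details": auth.strip()}
--     if headers.get('dkim-signature'):
--         if result["status"] == "not_found":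
--             result = {"status": "present", "details": "DKIM signature present but no verification result"}
--     return result
-- ===== SOURCE B (Python) =====
-- def check_dkim(headers: dict) -> dict:
--     """Analyze DKIM authentication results."""
--     result = {"status": "not_found", "details": "No DKIM signature found"}
--     for auth in reversed(headers.get('authentication-results', [])):
--         auth_lower = auth.lower()
--         if 'dkim=pass' in auth_lower:
--             result = {"status": "pass", "details": auth.strip()}
--             break
--         if 'dkim=fail' in auth_lower:
--             result = {"status": "fail", "details": auth.strip()}
--             break
--     if result["status"] == "not_found" and headers.get('dkim-signature'):
--         result = {"status": "present", "details": "DKIM signature present but no verification result"}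
--     return result
-- ===== Notes on version B (the rewrite author's own statement) =====
-- stated objective: alternative
-- what changed: Replaces A's overwrite-every-match forward pass over all authentication-results entries with an early-terminating reverse search that stops at the first (i.e. most recent) entry containing dkim=pass/dkim=fail, keeping pass-before-fail precedence within the entry.
import Mathlib
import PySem

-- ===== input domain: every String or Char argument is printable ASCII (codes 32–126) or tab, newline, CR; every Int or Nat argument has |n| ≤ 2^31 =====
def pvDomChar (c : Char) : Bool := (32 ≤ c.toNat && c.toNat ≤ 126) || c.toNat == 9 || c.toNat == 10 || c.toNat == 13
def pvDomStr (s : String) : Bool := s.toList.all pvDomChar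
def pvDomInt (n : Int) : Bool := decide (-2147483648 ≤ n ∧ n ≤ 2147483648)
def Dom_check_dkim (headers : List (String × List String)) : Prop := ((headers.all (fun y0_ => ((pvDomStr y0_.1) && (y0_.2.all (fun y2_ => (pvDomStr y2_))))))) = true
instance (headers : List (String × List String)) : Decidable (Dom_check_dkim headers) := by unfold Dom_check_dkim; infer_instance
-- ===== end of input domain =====

-- B replaces A's overwrite-every-match forward pass by an early-terminating reverse
-- search for the most recent dkim=pass/dkim=fail entry (alternative decomposition, same cost class).

-- ===== PORT A =====
-- truthiness of headers.get('dkim-signature') (a missing key or an empty list is falsy)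
def pvSigTruthy (o : Option (List String)) : Bool :=
  match o with
  | some l => !l.isEmpty
  | none => false

-- step of A's forward loop over authentication-results
def pvDkimStep (r : List (String × String)) (auth : String) : List (String × String) :=
  let auth_lower := PySem.Str.lower auth
  if PySem.Str.isIn "dkim=pass" auth_lower then
    [("status", "pass"), ("details", PySem.Str.strip auth)]
  else if PySem.Str.isIn "dkim=fail" auth_lower then
    [("status", "fail"), ("details", PySem.Str.strip auth)]
  else r

def check_dkim (headers : List (String × List String)) : List (String × String) :=
  let result : List (String × String) :=
    [("status", "not_found"), ("details", "No DKIM signature found")]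
  let result := ((PySem.Dict.mk headers).getD "authentication-results" []).foldl pvDkimStep result
  if pvSigTruthy ((PySem.Dict.mk headers).get? "dkim-signature") then
    if (PySem.Dict.mk result).get? "status" = some "not_found" then
      [("status", "present"), ("details", "DKIM signature present but no verification result")]
    else result
  else result

-- ===== PORT B =====
-- B's reverse loop with break: first matching entry of the reversed list
def pvDkimFindRev : List String → Option (String × String)
  | [] => none
  | auth :: rest =>
    let auth_lower := PySem.Str.lower auth
    if PySem.Str.isIn "dkim=pass" auth_lower then some ("pass", PySem.Str.strip auth)
    else if PySem.Str.isIn "dkim=fail" auth_lower then some ("fail", PySem.Str.strip auth)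
    else pvDkimFindRev rest

def check_dkim_alt (headers : List (String × List String)) : List (String × String) :=
  match pvDkimFindRev ((PySem.Dict.mk headers).getD "authentication-results" []).reverse with
  | some (s, d) => [("status", s), ("details", d)]
  | none =>
    if pvSigTruthy ((PySem.Dict.mk headers).get? "dkim-signature") then
      [("status", "present"), ("details", "DKIM signature present but no verification result")]
    else [("status", "not_found"), ("details", "No DKIM signature found")]

-- ===== PRECONDITION & SPEC =====
def Spec_check_dkim (headers : List (String × List String)) (out : List (String × String)) : Prop := out = check_dkim_alt headers
instance (headers : List (String × List String)) (out : List (String × String)) : Decidable (Spec_check_dkim headers out) := by unfold Spec_check_dkim; infer_instance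

-- ===== CLAIM (what is proved, stated in full; the proofs are below) =====
def Claim_equal_check_dkim : Prop := ∀ (headers : List (String × List String)), Dom_check_dkim headers → Spec_check_dkim headers (check_dkim headers)

-- ===== LEMMAS AND PROOFS =====

theorem pvDkimFindRev_append (l1 l2 : List String) :
    pvDkimFindRev (l1 ++ l2) = ((pvDkimFindRev l1).or (pvDkimFindRev l2)) := by
  induction l1 with
  | nil => simp [pvDkimFindRev]
  | cons x xs ih =>
    simp only [List.cons_append, pvDkimFindRev]
    split_ifs <;> simp [ih]

theorem pvDkim_foldl_eq (xs : List String) (r0 : List (String × String)) :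
    xs.foldl pvDkimStep r0 =
      match pvDkimFindRev xs.reverse with
      | some (s, d) => [("status", s), ("details", d)]
      | none => r0 := by
  induction xs generalizing r0 with
  | nil => simp [pvDkimFindRev]
  | cons x xs ih =>
    rw [List.foldl_cons, ih, List.reverse_cons, pvDkimFindRev_append]
    cases h : pvDkimFindRev xs.reverse with
    | some r => simp [Option.or]
    | none =>
      simp only [Option.or, pvDkimFindRev, pvDkimStep]
      split_ifs <;> rfl

theorem pvDkimFindRev_status {xs : List String} {s d : String}
    (h : pvDkimFindRev xs = some (s, d)) : s = "pass" ∨ s = "fail" := by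
  induction xs with
  | nil => simp [pvDkimFindRev] at h
  | cons x rest ih =>
    simp only [pvDkimFindRev] at h
    split_ifs at h with h1 h2
    · cases h; exact Or.inl rfl
    · cases h; exact Or.inr rfl
    · exact ih h

-- ===== VERDICT (by name: the statement is the Claim_ definition above) =====
theorem check_dkim_spec : Claim_equal_check_dkim := by
  intro headers _
  unfold Spec_check_dkim check_dkim check_dkim_alt
  simp only [pvDkim_foldl_eq]
  cases h : pvDkimFindRev ((PySem.Dict.mk headers).getD "authentication-results" []).reverse with
  | none => simp [PySem.Dict.get?]
  | some r =>
    obtain ⟨s, d⟩ := r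
    have hs : s ≠ "not_found" := by
      rcases pvDkimFindRev_status h with h' | h' <;> subst h' <;> decide
    simp [PySem.Dict.get?, hs]
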